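-- pv_equiv track=rewrite | github.com/yangwangmadrid/EzReson | EzReson_v3.0_release/topo.py | ifAdjacetRings
-- ===== SOURCE A (Python) =====
-- def ifAdjacetRings( rg1, rg2 ):
--     nrg1 = len( rg1 )
--     nrg2 = len( rg2 )
--     for i in range( nrg1 ):
--         if i < nrg1-1:
--             bnd1 = [ rg1[i], rg1[i+1] ]
--         else:
--             bnd1 = [ rg1[i], rg1[0] ]
--         # Reorder the two atom labels in bnd1:
--         if bnd1[1] < bnd1[0]:
--             bnd1 = [ bnd1[1], bnd1[0] ]
--
--         for j in range( nrg2 ):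
--             if j < nrg2-1:
--                 bnd2 = [ rg2[j], rg2[j+1] ]
--             else:
--                 bnd2 = [ rg2[j], rg2[0] ]
--             # Reorder the two atom labels in bnd2:
--             if bnd2[1] < bnd2[0]:
--                 bnd2 = [ bnd2[1], bnd2[0] ]
--
--             if bnd1 == bnd2:
--                 return True
--
--     return False
-- ===== SOURCE B (Python) =====
-- def ifAdjacetRings(rg1, rg2):
--     def edges(ring):
--         n = len(ring)
--         return {tuple(sorted((ring[i], ring[(i + 1) % n]))) for i in range(n)}
--     return bool(edges(rg1) & edges(rg2))
-- ===== Notes on version B (the rewrite author's own statement) =====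
-- stated objective: simpler
-- what changed: Replaces the nested edge-compare loops by building the normalized edge set of each ring once and testing set intersection for non-emptiness.
import Mathlib
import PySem

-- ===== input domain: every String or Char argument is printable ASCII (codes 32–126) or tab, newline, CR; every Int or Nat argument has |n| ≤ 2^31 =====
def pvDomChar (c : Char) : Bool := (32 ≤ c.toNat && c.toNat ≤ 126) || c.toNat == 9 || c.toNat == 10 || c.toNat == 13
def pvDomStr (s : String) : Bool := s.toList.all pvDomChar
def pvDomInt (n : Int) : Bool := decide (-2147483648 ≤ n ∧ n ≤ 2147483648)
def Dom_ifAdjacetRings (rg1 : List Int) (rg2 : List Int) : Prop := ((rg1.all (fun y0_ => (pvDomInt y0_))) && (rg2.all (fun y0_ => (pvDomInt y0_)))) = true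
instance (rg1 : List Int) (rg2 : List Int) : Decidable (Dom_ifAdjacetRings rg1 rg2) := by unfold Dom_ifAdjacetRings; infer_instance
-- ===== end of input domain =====

-- B replaces A's nested edge-compare loops by two normalized edge sets and a set intersection (simpler, asymptotically faster).

-- ===== PORT A =====
-- A's normalized bond at position i of the outer ring (the two ifs of A's loop body)
def pvBndA (rg : List Int) (i : Nat) : Int × Int :=
  let b := if i < rg.length - 1 then (rg.getD i 0, rg.getD (i+1) 0)
           else (rg.getD i 0, rg.getD 0 0)
  if b.2 < b.1 then (b.2, b.1) else b

def ifAdjacetRings (rg1 : List Int) (rg2 : List Int) : Bool :=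
  (List.range rg1.length).any (fun i =>
    let bnd1 := pvBndA rg1 i
    (List.range rg2.length).any (fun j =>
      let bnd2 := pvBndA rg2 j
      bnd1 == bnd2))

-- ===== PORT B =====
-- tuple(sorted((ring[i], ring[(i+1) % n]))) from Source B
def pvEdge (rg : List Int) (i : Nat) : Int × Int :=
  let a := rg.getD i 0
  let b := rg.getD ((i+1) % rg.length) 0
  if a ≤ b then (a, b) else (b, a)

-- the set comprehension of Source B
def pvEdges (rg : List Int) : PySem.Set (Int × Int) :=
  PySem.Set.ofList ((List.range rg.length).map (pvEdge rg))

def ifAdjacetRings_alt (rg1 : List Int) (rg2 : List Int) : Bool :=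
  !(PySem.Set.inter (pvEdges rg1) (pvEdges rg2)).isEmpty

-- ===== PRECONDITION & SPEC =====
def Spec_ifAdjacetRings (rg1 : List Int) (rg2 : List Int) (out : Bool) : Prop := out = ifAdjacetRings_alt rg1 rg2
instance (rg1 : List Int) (rg2 : List Int) (out : Bool) : Decidable (Spec_ifAdjacetRings rg1 rg2 out) := by unfold Spec_ifAdjacetRings; infer_instance

-- ===== CLAIM (what is proved, stated in full; the proofs are below) =====
def Claim_equal_ifAdjacetRings : Prop := ∀ (rg1 : List Int) (rg2 : List Int), Dom_ifAdjacetRings rg1 rg2 → Spec_ifAdjacetRings rg1 rg2 (ifAdjacetRings rg1 rg2)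

-- ===== LEMMAS AND PROOFS =====

-- A's normalized bond equals B's normalized edge for every in-range index
theorem pvBndA_eq_pvEdge (rg : List Int) (i : Nat) (h : i < rg.length) :
    pvBndA rg i = pvEdge rg i := by
  unfold pvBndA pvEdge
  have hidx : (i + 1) % rg.length = if i < rg.length - 1 then i + 1 else 0 := by
    split
    · exact Nat.mod_eq_of_lt (by omega)
    · have : i + 1 = rg.length := by omega
      simp [this]
  rw [hidx]
  by_cases hlt : i < rg.length - 1 <;> simp only [hlt, if_true, if_false] <;>
    (split_ifs with h1 h2 <;> first | rfl | omega)

theorem ifAdjacetRings_iff (rg1 rg2 : List Int) :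
    ifAdjacetRings rg1 rg2 = true ↔
      ∃ i ∈ List.range rg1.length, ∃ j ∈ List.range rg2.length, pvEdge rg1 i = pvEdge rg2 j := by
  unfold ifAdjacetRings
  simp only [List.any_eq_true, beq_iff_eq, List.mem_range]
  constructor
  · rintro ⟨i, hi, j, hj, hij⟩
    exact ⟨i, by simpa using hi, j, by simpa using hj,
      by rw [← pvBndA_eq_pvEdge _ _ hi, ← pvBndA_eq_pvEdge _ _ hj]; exact hij⟩
  · rintro ⟨i, hi, j, hj, hij⟩
    exact ⟨i, hi, j, hj,
      by rw [pvBndA_eq_pvEdge _ _ hi, pvBndA_eq_pvEdge _ _ hj]; exact hij⟩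

theorem ifAdjacetRings_alt_iff (rg1 rg2 : List Int) :
    ifAdjacetRings_alt rg1 rg2 = true ↔
      ∃ i ∈ List.range rg1.length, ∃ j ∈ List.range rg2.length, pvEdge rg1 i = pvEdge rg2 j := by
  unfold ifAdjacetRings_alt pvEdges
  rw [Bool.not_eq_eq_eq_not, Bool.not_true, List.isEmpty_eq_false_iff_exists_mem]
  constructor
  · rintro ⟨x, hx⟩
    rw [PySem.Set.mem_inter] at hx
    obtain ⟨h1, h2⟩ := hx
    rw [PySem.Set.mem_ofList, List.mem_map] at h1 h2
    obtain ⟨i, hi, hix⟩ := h1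
    obtain ⟨j, hj, hjx⟩ := h2
    exact ⟨i, hi, j, hj, by rw [hix, hjx]⟩
  · rintro ⟨i, hi, j, hj, hij⟩
    refine ⟨pvEdge rg1 i, ?_⟩
    rw [PySem.Set.mem_inter, PySem.Set.mem_ofList, PySem.Set.mem_ofList]
    exact ⟨List.mem_map.2 ⟨i, hi, rfl⟩, List.mem_map.2 ⟨j, hj, hij.symm⟩⟩

-- ===== VERDICT (by name: the statement is the Claim_ definition above) =====
theorem ifAdjacetRings_spec : Claim_equal_ifAdjacetRings := by
  intro rg1 rg2 _
  unfold Spec_ifAdjacetRings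
  rw [Bool.eq_iff_iff, ifAdjacetRings_iff, ifAdjacetRings_alt_iff]
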